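-- pv_equiv track=rewrite | github.com/vickyfriss/Football-analytics | 202603 - 3b - Premier League 24-25 player statistics.py | get_feature_colors
-- ===== SOURCE A (Python) =====
-- FEATURE_GROUPS = {
--     "Finishing": [
--         "shots_total_per90","shots_goals_per90","shots_conversion",
--         "shots_self_created_pct","shots_transition_pct",
--         "shots_difficulty_index","shots_pressure_index","shots_freedom_index"
--     ],
--     "Passing & Decision": [
--         "passes_attempted_per90","avg_xpass_completion",
--         "completion_minus_xpass_per_pass","total_pass_value_per90",
--         "avg_decision_quality","chose_best_rate","option_selection_rate"
--     ],
--     "Involvement": [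
--         "times_targeted_per90"
--     ],
--     "Off-ball": [
--         "offball_runs_total_per90","offball_distance_total_per90"
--     ],
--     "Possession Impact": [
--         "possession_progression_total_per90",
--         "possession_line_breaks_per90",
--         "possession_threat_index"
--     ],
--     "Defensive": [
--         "obe_total_events_per90",
--         "obe_possession_losses_forced_per90",
--         "obe_pressure_events_per90"
--     ]
-- }
--
-- GROUP_COLORS = {
--     "Finishing": "#E63946",
--     "Passing & Decision": "#457B9D",
--     "Involvement": "#2A9D8F",
--     "Off-ball": "#F4A261",
--     "Possession Impact": "#6A4C93",
--     "Defensive": "#264653"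
-- }
--
-- def get_feature_colors(features):
--     colors = []
--     for f in features:
--         for group, feats in FEATURE_GROUPS.items():
--             if f in feats:
--                 colors.append(GROUP_COLORS[group])
--                 break
--     return colors
-- ===== SOURCE B (Python) =====
-- # B: a single flat feature-name -> color table written out once, plus one
-- # comprehension pass with a membership guard; no per-feature scan over groups.
-- FEATURE_COLOR = {
--     "shots_total_per90": "#E63946",
--     "shots_goals_per90": "#E63946",
--     "shots_conversion": "#E63946",
--     "shots_self_created_pct": "#E63946",
--     "shots_transition_pct": "#E63946",
--     "shots_difficulty_index": "#E63946",
--     "shots_pressure_index": "#E63946",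
--     "shots_freedom_index": "#E63946",
--     "passes_attempted_per90": "#457B9D",
--     "avg_xpass_completion": "#457B9D",
--     "completion_minus_xpass_per_pass": "#457B9D",
--     "total_pass_value_per90": "#457B9D",
--     "avg_decision_quality": "#457B9D",
--     "chose_best_rate": "#457B9D",
--     "option_selection_rate": "#457B9D",
--     "times_targeted_per90": "#2A9D8F",
--     "offball_runs_total_per90": "#F4A261",
--     "offball_distance_total_per90": "#F4A261",
--     "possession_progression_total_per90": "#6A4C93",
--     "possession_line_breaks_per90": "#6A4C93",
--     "possession_threat_index": "#6A4C93",
--     "obe_total_events_per90": "#264653",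
--     "obe_possession_losses_forced_per90": "#264653",
--     "obe_pressure_events_per90": "#264653",
-- }
--
-- def get_feature_colors(features):
--     return [FEATURE_COLOR[f] for f in features if f in FEATURE_COLOR]
-- ===== Notes on version B (the rewrite author's own statement) =====
-- stated objective: faster
-- what changed: Replaces the per-feature nested scan over FEATURE_GROUPS plus a GROUP_COLORS lookup with one flat feature-to-color dict and a single guarded comprehension pass with O(1) lookups.
import Mathlib
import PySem

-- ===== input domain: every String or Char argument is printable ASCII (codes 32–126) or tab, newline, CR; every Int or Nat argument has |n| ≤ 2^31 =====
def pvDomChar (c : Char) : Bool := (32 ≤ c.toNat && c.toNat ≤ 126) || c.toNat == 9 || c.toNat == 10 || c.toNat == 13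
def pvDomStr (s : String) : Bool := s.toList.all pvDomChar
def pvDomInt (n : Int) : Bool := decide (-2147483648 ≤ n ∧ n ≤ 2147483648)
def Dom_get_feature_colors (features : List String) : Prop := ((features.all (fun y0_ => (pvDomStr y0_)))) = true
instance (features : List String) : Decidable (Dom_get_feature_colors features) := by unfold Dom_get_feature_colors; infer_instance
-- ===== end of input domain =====

-- B replaces A's per-feature scan over FEATURE_GROUPS + GROUP_COLORS lookup by one flat feature→color table and a single guarded comprehension pass (simpler).

-- ===== PORT A =====
-- FEATURE_GROUPS as an insertion-ordered dict, kept as its items list (that is how A iterates it)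
def fgItems : List (String × List String) :=
  [("Finishing",
     ["shots_total_per90","shots_goals_per90","shots_conversion",
      "shots_self_created_pct","shots_transition_pct",
      "shots_difficulty_index","shots_pressure_index","shots_freedom_index"]),
   ("Passing & Decision",
     ["passes_attempted_per90","avg_xpass_completion",
      "completion_minus_xpass_per_pass","total_pass_value_per90",
      "avg_decision_quality","chose_best_rate","option_selection_rate"]),
   ("Involvement", ["times_targeted_per90"]),
   ("Off-ball", ["offball_runs_total_per90","offball_distance_total_per90"]),
   ("Possession Impact",
     ["possession_progression_total_per90","possession_line_breaks_per90",
      "possession_threat_index"]),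
   ("Defensive",
     ["obe_total_events_per90","obe_possession_losses_forced_per90",
      "obe_pressure_events_per90"])]

def groupColors : PySem.Dict String String :=
  PySem.Dict.ofList
    [("Finishing", "#E63946"), ("Passing & Decision", "#457B9D"),
     ("Involvement", "#2A9D8F"), ("Off-ball", "#F4A261"),
     ("Possession Impact", "#6A4C93"), ("Defensive", "#264653")]

-- A's inner 'for group, feats … if f in feats: append(GROUP_COLORS[group]); break' loop for one f
-- (GROUP_COLORS[group] via get?: every group key is present, so KeyError is unreachable)
def innerScanA (f : String) : Option String :=
  fgItems.findSome? (fun gf => if f ∈ gf.2 then groupColors.get? gf.1 else none)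

def get_feature_colors (features : List String) : List String :=
  features.foldl (fun colors f =>
    match innerScanA f with
    | some c => colors ++ [c]
    | none => colors) []

-- ===== PORT B =====
-- FEATURE_COLOR: the flat literal table of Source B
def featureColor : PySem.Dict String String :=
  PySem.Dict.ofList
    [("shots_total_per90", "#E63946"), ("shots_goals_per90", "#E63946"),
     ("shots_conversion", "#E63946"), ("shots_self_created_pct", "#E63946"),
     ("shots_transition_pct", "#E63946"), ("shots_difficulty_index", "#E63946"),
     ("shots_pressure_index", "#E63946"), ("shots_freedom_index", "#E63946"),
     ("passes_attempted_per90", "#457B9D"), ("avg_xpass_completion", "#457B9D"),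
     ("completion_minus_xpass_per_pass", "#457B9D"), ("total_pass_value_per90", "#457B9D"),
     ("avg_decision_quality", "#457B9D"), ("chose_best_rate", "#457B9D"),
     ("option_selection_rate", "#457B9D"), ("times_targeted_per90", "#2A9D8F"),
     ("offball_runs_total_per90", "#F4A261"), ("offball_distance_total_per90", "#F4A261"),
     ("possession_progression_total_per90", "#6A4C93"),
     ("possession_line_breaks_per90", "#6A4C93"), ("possession_threat_index", "#6A4C93"),
     ("obe_total_events_per90", "#264653"), ("obe_possession_losses_forced_per90", "#264653"),
     ("obe_pressure_events_per90", "#264653")]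

-- '[FEATURE_COLOR[f] for f in features if f in FEATURE_COLOR]': the guard and the
-- lookup combine into one get? (present key ⇒ some value, absent ⇒ skipped)
def get_feature_colors_alt (features : List String) : List String :=
  features.filterMap (fun f => featureColor.get? f)

-- ===== PRECONDITION & SPEC =====
def Spec_get_feature_colors (features : List String) (out : List String) : Prop := out = get_feature_colors_alt features
instance (features : List String) (out : List String) : Decidable (Spec_get_feature_colors features out) := by unfold Spec_get_feature_colors; infer_instance

-- ===== CLAIM (what is proved, stated in full; the proofs are below) =====
def Claim_equal_get_feature_colors : Prop := ∀ (features : List String), Dom_get_feature_colors features → Spec_get_feature_colors features (get_feature_colors features)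

-- ===== LEMMAS AND PROOFS =====

-- the one-feature results of the two programs agree
theorem innerScanA_eq_featureColor (f : String) : innerScanA f = featureColor.get? f := by
  by_cases h1 : f = "shots_total_per90"; · subst h1; decide
  by_cases h2 : f = "shots_goals_per90"; · subst h2; decide
  by_cases h3 : f = "shots_conversion"; · subst h3; decide
  by_cases h4 : f = "shots_self_created_pct"; · subst h4; decide
  by_cases h5 : f = "shots_transition_pct"; · subst h5; decide
  by_cases h6 : f = "shots_difficulty_index"; · subst h6; decide
  by_cases h7 : f = "shots_pressure_index"; · subst h7; decide
  by_cases h8 : f = "shots_freedom_index"; · subst h8; decide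
  by_cases h9 : f = "passes_attempted_per90"; · subst h9; decide
  by_cases h10 : f = "avg_xpass_completion"; · subst h10; decide
  by_cases h11 : f = "completion_minus_xpass_per_pass"; · subst h11; decide
  by_cases h12 : f = "total_pass_value_per90"; · subst h12; decide
  by_cases h13 : f = "avg_decision_quality"; · subst h13; decide
  by_cases h14 : f = "chose_best_rate"; · subst h14; decide
  by_cases h15 : f = "option_selection_rate"; · subst h15; decide
  by_cases h16 : f = "times_targeted_per90"; · subst h16; decide
  by_cases h17 : f = "offball_runs_total_per90"; · subst h17; decide
  by_cases h18 : f = "offball_distance_total_per90"; · subst h18; decide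
  by_cases h19 : f = "possession_progression_total_per90"; · subst h19; decide
  by_cases h20 : f = "possession_line_breaks_per90"; · subst h20; decide
  by_cases h21 : f = "possession_threat_index"; · subst h21; decide
  by_cases h22 : f = "obe_total_events_per90"; · subst h22; decide
  by_cases h23 : f = "obe_possession_losses_forced_per90"; · subst h23; decide
  by_cases h24 : f = "obe_pressure_events_per90"; · subst h24; decide
  have hB : featureColor.get? f = none := by
    rw [show featureColor = PySem.Dict.mk
      [("shots_total_per90", "#E63946"),
       ("shots_goals_per90", "#E63946"),
       ("shots_conversion", "#E63946"),
       ("shots_self_created_pct", "#E63946"),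
       ("shots_transition_pct", "#E63946"),
       ("shots_difficulty_index", "#E63946"),
       ("shots_pressure_index", "#E63946"),
       ("shots_freedom_index", "#E63946"),
       ("passes_attempted_per90", "#457B9D"),
       ("avg_xpass_completion", "#457B9D"),
       ("completion_minus_xpass_per_pass", "#457B9D"),
       ("total_pass_value_per90", "#457B9D"),
       ("avg_decision_quality", "#457B9D"),
       ("chose_best_rate", "#457B9D"),
       ("option_selection_rate", "#457B9D"),
       ("times_targeted_per90", "#2A9D8F"),
       ("offball_runs_total_per90", "#F4A261"),
       ("offball_distance_total_per90", "#F4A261"),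
       ("possession_progression_total_per90", "#6A4C93"),
       ("possession_line_breaks_per90", "#6A4C93"),
       ("possession_threat_index", "#6A4C93"),
       ("obe_total_events_per90", "#264653"),
       ("obe_possession_losses_forced_per90", "#264653"),
       ("obe_pressure_events_per90", "#264653")] from by decide]
    rw [PySem.Dict.get?_mk_cons, if_neg (fun h => h1 (beq_iff_eq.mp h).symm),
      PySem.Dict.get?_mk_cons, if_neg (fun h => h2 (beq_iff_eq.mp h).symm),
      PySem.Dict.get?_mk_cons, if_neg (fun h => h3 (beq_iff_eq.mp h).symm),
      PySem.Dict.get?_mk_cons, if_neg (fun h => h4 (beq_iff_eq.mp h).symm),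
      PySem.Dict.get?_mk_cons, if_neg (fun h => h5 (beq_iff_eq.mp h).symm),
      PySem.Dict.get?_mk_cons, if_neg (fun h => h6 (beq_iff_eq.mp h).symm),
      PySem.Dict.get?_mk_cons, if_neg (fun h => h7 (beq_iff_eq.mp h).symm),
      PySem.Dict.get?_mk_cons, if_neg (fun h => h8 (beq_iff_eq.mp h).symm),
      PySem.Dict.get?_mk_cons, if_neg (fun h => h9 (beq_iff_eq.mp h).symm),
      PySem.Dict.get?_mk_cons, if_neg (fun h => h10 (beq_iff_eq.mp h).symm),
      PySem.Dict.get?_mk_cons, if_neg (fun h => h11 (beq_iff_eq.mp h).symm),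
      PySem.Dict.get?_mk_cons, if_neg (fun h => h12 (beq_iff_eq.mp h).symm),
      PySem.Dict.get?_mk_cons, if_neg (fun h => h13 (beq_iff_eq.mp h).symm),
      PySem.Dict.get?_mk_cons, if_neg (fun h => h14 (beq_iff_eq.mp h).symm),
      PySem.Dict.get?_mk_cons, if_neg (fun h => h15 (beq_iff_eq.mp h).symm),
      PySem.Dict.get?_mk_cons, if_neg (fun h => h16 (beq_iff_eq.mp h).symm),
      PySem.Dict.get?_mk_cons, if_neg (fun h => h17 (beq_iff_eq.mp h).symm),
      PySem.Dict.get?_mk_cons, if_neg (fun h => h18 (beq_iff_eq.mp h).symm),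
      PySem.Dict.get?_mk_cons, if_neg (fun h => h19 (beq_iff_eq.mp h).symm),
      PySem.Dict.get?_mk_cons, if_neg (fun h => h20 (beq_iff_eq.mp h).symm),
      PySem.Dict.get?_mk_cons, if_neg (fun h => h21 (beq_iff_eq.mp h).symm),
      PySem.Dict.get?_mk_cons, if_neg (fun h => h22 (beq_iff_eq.mp h).symm),
      PySem.Dict.get?_mk_cons, if_neg (fun h => h23 (beq_iff_eq.mp h).symm),
      PySem.Dict.get?_mk_cons, if_neg (fun h => h24 (beq_iff_eq.mp h).symm)]
    simp [PySem.Dict.get?]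
  have hA : innerScanA f = none := by
    simp [innerScanA, fgItems, List.findSome?, h1, h2, h3, h4, h5, h6, h7, h8, h9, h10, h11, h12, h13, h14, h15, h16, h17, h18, h19, h20, h21, h22, h23, h24]
  rw [hA, hB]

-- A's append-on-hit foldl is B's filterMap
theorem foldlA_eq_filterMap (features : List String) (acc : List String) :
    features.foldl (fun colors f =>
      match innerScanA f with
      | some c => colors ++ [c]
      | none => colors) acc = acc ++ features.filterMap (fun f => featureColor.get? f) := by
  induction features generalizing acc with
  | nil => simp
  | cons f fs ih =>
    simp only [List.foldl, List.filterMap]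
    rw [ih, innerScanA_eq_featureColor]
    cases featureColor.get? f <;> simp

-- ===== VERDICT (by name: the statement is the Claim_ definition above) =====
theorem get_feature_colors_spec : Claim_equal_get_feature_colors := by
  intro features _
  unfold Spec_get_feature_colors get_feature_colors get_feature_colors_alt
  simpa using foldlA_eq_filterMap features []
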